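-- pv_equiv track=rewrite | github.com/declanatkins/Stock-Analyzer | Python/ArticleHandler.py | getDominantKeywordSet
-- ===== SOURCE A (Python) =====
-- def getDominantKeywordSet(keywordCounts):
--
--     maxCount = 0
--     for key in keywordCounts:
--         if keywordCounts[key] > maxCount:
--             maxCount = keywordCounts[key]
--             maxKey = key
--     if maxCount == 0:
--         return 'Neutral'
--     for key in keywordCounts:
--         if key != maxKey:
--             if keywordCounts[key] >= maxCount - 5:
--                 break
--     else:
--         return maxKey
--     return "Neutral"
-- ===== SOURCE B (Python) =====
-- def getDominantKeywordSet(keywordCounts):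
--     counts = sorted(keywordCounts.values(), reverse=True)
--     if not counts or counts[0] <= 0:
--         return 'Neutral'
--     if len(counts) > 1 and counts[1] >= counts[0] - 5:
--         return 'Neutral'
--     return max(keywordCounts, key=keywordCounts.get)
-- ===== Notes on version B (the rewrite author's own statement) =====
-- stated objective: simpler
-- what changed: B replaces A's two explicit scans with loop-else sentinel state by sorting the values descending and doing one top-two comparison, then picking the max key with max(d, key=d.get); correct because a returned key's count is always a unique maximum (ties yield Neutral).
import Mathlib
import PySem

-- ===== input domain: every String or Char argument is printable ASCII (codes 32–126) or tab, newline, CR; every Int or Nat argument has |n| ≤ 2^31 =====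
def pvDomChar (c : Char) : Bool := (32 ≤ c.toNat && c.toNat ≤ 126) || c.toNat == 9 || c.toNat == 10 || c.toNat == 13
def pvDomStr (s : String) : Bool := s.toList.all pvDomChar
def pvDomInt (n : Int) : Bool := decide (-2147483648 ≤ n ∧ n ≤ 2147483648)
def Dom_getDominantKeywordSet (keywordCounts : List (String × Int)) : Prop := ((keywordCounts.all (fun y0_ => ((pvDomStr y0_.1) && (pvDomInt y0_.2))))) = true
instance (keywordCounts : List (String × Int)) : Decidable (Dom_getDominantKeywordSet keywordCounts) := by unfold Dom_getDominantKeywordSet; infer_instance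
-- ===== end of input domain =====

-- B sorts the values descending and compares the top two, instead of A's two scans with a
-- loop-else sentinel; same results (simpler, not faster).

-- ===== PORT A =====
-- the input dict, as Python builds it from the pairs (last value wins, first position kept)
def getDominantKeywordSet (keywordCounts : List (String × Int)) : String :=
  let d := PySem.Dict.ofList keywordCounts
  -- maxCount = 0; for key in keywordCounts: if d[key] > maxCount: maxCount, maxKey = d[key], key
  -- (maxKey starts unbound in Python; "" stands for it and is never returned while unset)
  let st := d.keys.foldl
    (fun (p : Int × String) key => if d.getD key 0 > p.1 then (d.getD key 0, key) else p)
    (0, "")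
  if st.1 = 0 then "Neutral"
  else if d.keys.any (fun key => key != st.2 && decide (st.1 - 5 ≤ d.getD key 0)) then "Neutral"
  else st.2

-- ===== PORT B =====
def getDominantKeywordSet_alt (keywordCounts : List (String × Int)) : String :=
  let d := PySem.Dict.ofList keywordCounts
  let counts := PySem.List.sorted d.values (fun v => v) true
  if counts.length = 0 ∨ PySem.List.pyGetD counts 0 0 ≤ 0 then "Neutral"
  else if 1 < counts.length ∧ PySem.List.pyGetD counts 0 0 - 5 ≤ PySem.List.pyGetD counts 1 0 then "Neutral"
  else (PySem.List.max? d.keys (fun k => d.getD k 0)).getD ""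

-- ===== PRECONDITION & SPEC =====
def Spec_getDominantKeywordSet (keywordCounts : List (String × Int)) (out : String) : Prop := out = getDominantKeywordSet_alt keywordCounts
instance (keywordCounts : List (String × Int)) (out : String) : Decidable (Spec_getDominantKeywordSet keywordCounts out) := by unfold Spec_getDominantKeywordSet; infer_instance

-- ===== CLAIM (what is proved, stated in full; the proofs are below) =====
def Claim_equal_getDominantKeywordSet : Prop := ∀ (keywordCounts : List (String × Int)), Dom_getDominantKeywordSet keywordCounts → Spec_getDominantKeywordSet keywordCounts (getDominantKeywordSet keywordCounts)

-- ===== LEMMAS AND PROOFS =====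

-- characterisation of A's first loop: the accumulator only grows, it bounds every value seen,
-- and it is either untouched or records a key of the list together with its value
theorem pv_fold_facts (f : String → Int) (ks : List String) (acc : Int × String) :
    acc.1 ≤ (ks.foldl (fun p k => if f k > p.1 then (f k, k) else p) acc).1 ∧
    (∀ k ∈ ks, f k ≤ (ks.foldl (fun p k => if f k > p.1 then (f k, k) else p) acc).1) ∧
    ((ks.foldl (fun p k => if f k > p.1 then (f k, k) else p) acc) = acc ∨
      ((ks.foldl (fun p k => if f k > p.1 then (f k, k) else p) acc).2 ∈ ks ∧
        f (ks.foldl (fun p k => if f k > p.1 then (f k, k) else p) acc).2 =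
          (ks.foldl (fun p k => if f k > p.1 then (f k, k) else p) acc).1)) := by
  induction ks generalizing acc with
  | nil => simp
  | cons k ks ih =>
    simp only [List.foldl_cons]
    obtain ⟨ih1, ih2, ih3⟩ := ih (if f k > acc.1 then (f k, k) else acc)
    by_cases h : f k > acc.1
    · simp only [if_pos h] at ih1 ih2 ih3 ⊢
      refine ⟨le_trans (le_of_lt h) ih1, ?_, ?_⟩
      · intro x hx
        rcases List.mem_cons.mp hx with rfl | hx
        · exact le_trans (le_refl (f x)) ih1
        · exact ih2 x hx
      · rcases ih3 with he | ⟨hm, hv⟩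
        · exact Or.inr ⟨by rw [he]; exact List.mem_cons_self, by rw [he]⟩
        · exact Or.inr ⟨List.mem_cons_of_mem _ hm, hv⟩
    · simp only [if_neg h] at ih1 ih2 ih3 ⊢
      refine ⟨ih1, ?_, ?_⟩
      · intro x hx
        rcases List.mem_cons.mp hx with rfl | hx
        · exact le_trans (le_of_not_gt h) ih1
        · exact ih2 x hx
      · rcases ih3 with he | ⟨hm, hv⟩
        · exact Or.inl he
        · exact Or.inr ⟨List.mem_cons_of_mem _ hm, hv⟩

-- in a descending list, some element is ≥ c iff the head is
theorem pv_desc_exists (r0 : Int) (rs : List Int) (c : Int)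
    (h : (r0 :: rs).Pairwise (fun a b => b ≤ a)) :
    (∃ v ∈ r0 :: rs, c ≤ v) ↔ c ≤ r0 := by
  constructor
  · rintro ⟨v, hv, hcv⟩
    rcases List.mem_cons.mp hv with rfl | hv
    · exact hcv
    · exact le_trans hcv ((List.pairwise_cons.mp h).1 v hv)
  · intro hc; exact ⟨r0, List.mem_cons_self, hc⟩

-- the heart of the proof, stated over an abstract key list and value function
theorem pv_main (ks : List String) (f : String → Int) (hnd : ks.Nodup) :
    (let st := ks.foldl (fun p k => if f k > p.1 then (f k, k) else p) (0, "");
     if st.1 = 0 then "Neutral"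
     else if ks.any (fun key => key != st.2 && decide (st.1 - 5 ≤ f key)) then "Neutral"
     else st.2) =
    (let counts := PySem.List.sorted (ks.map f) (fun v => v) true;
     if counts.length = 0 ∨ PySem.List.pyGetD counts 0 0 ≤ 0 then "Neutral"
     else if 1 < counts.length ∧ PySem.List.pyGetD counts 0 0 - 5 ≤ PySem.List.pyGetD counts 1 0 then "Neutral"
     else (PySem.List.max? ks f).getD "") := by
  simp only []
  rcases hks : ks with _ | ⟨k0, ks'⟩
  · simp [PySem.List.sorted]
  rw [← hks]
  have hksne : ks ≠ [] := by rw [hks]; exact List.cons_ne_nil _ _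
  clear hks
  obtain ⟨h1, h2, h3⟩ := pv_fold_facts f ks (0, "")
  set st := ks.foldl (fun p k => if f k > p.1 then (f k, k) else p) (0, "") with hst
  set counts := PySem.List.sorted (ks.map f) (fun v => v) true with hcounts
  have hperm : counts.Perm (ks.map f) := PySem.List.sorted_perm _ _ _
  have hcne : counts ≠ [] := by
    rw [hcounts, Ne, PySem.List.sorted_eq_nil_iff, List.map_eq_nil_iff]
    exact hksne
  obtain ⟨c0, rest, hc⟩ := List.exists_cons_of_ne_nil hcne
  have hhead : ∀ y ∈ ks.map f, y ≤ c0 := by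
    have := PySem.List.key_head_sorted_rev_ge (ks.map f) (fun v => v) (hcounts ▸ hc)
    simpa using this
  have hc0mem : c0 ∈ ks.map f := hperm.subset (hc ▸ List.mem_cons_self)
  have hget0 : PySem.List.pyGetD counts 0 0 = c0 := by rw [hc]; simp [pysem]
  by_cases hM : st.1 = 0
  · -- A: Neutral.  B: the top count is ≤ 0, Neutral too.
    have hc0le : c0 ≤ 0 := by
      obtain ⟨k, hk, rfl⟩ := List.mem_map.mp hc0mem
      exact le_of_le_of_eq (h2 k hk) hM
    rw [if_pos hM, if_pos (Or.inr (hget0 ▸ hc0le))]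
  · have hMpos : 0 < st.1 := lt_of_le_of_ne h1 (Ne.symm hM)
    rcases h3 with he | ⟨hw, hfw⟩
    · exact absurd (congrArg Prod.fst he) hM
    have hMle : st.1 ≤ c0 := hfw ▸ hhead _ (List.mem_map_of_mem hw)
    have hc0le : c0 ≤ st.1 := by
      obtain ⟨k, hk, rfl⟩ := List.mem_map.mp hc0mem
      exact h2 k hk
    have hc0 : c0 = st.1 := le_antisymm hc0le hMle
    have hBg1 : ¬ (counts.length = 0 ∨ PySem.List.pyGetD counts 0 0 ≤ 0) := by
      rw [hget0, hc]
      push Not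
      exact ⟨by simp, by omega⟩
    rw [if_neg hM, if_neg hBg1]
    -- the values of the keys other than st.2 are, as a multiset, the tail of counts
    have hmp : counts.Perm (f st.2 :: (ks.erase st.2).map f) :=
      hperm.trans ((List.perm_cons_erase hw).map f)
    rw [hc, hfw, ← hc0] at hmp
    have hrp : rest.Perm ((ks.erase st.2).map f) := hmp.cons_inv
    have hpw : (c0 :: rest).Pairwise (fun a b => b ≤ a) := by
      have := PySem.List.sorted_pairwise_rev (xs := ks.map f) (key := fun v => v)
      rw [← hcounts, hc] at this
      simpa using this
    -- A's second loop condition ↔ some value in the tail is within 5 of the max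
    have hany : (ks.any (fun key => key != st.2 && decide (st.1 - 5 ≤ f key)) = true)
        ↔ ∃ v ∈ rest, st.1 - 5 ≤ v := by
      rw [List.any_eq_true]
      constructor
      · rintro ⟨k, hk, hb⟩
        simp only [Bool.and_eq_true, bne_iff_ne, decide_eq_true_eq] at hb
        refine ⟨f k, ?_, hb.2⟩
        rw [hrp.mem_iff]
        exact List.mem_map_of_mem (hnd.mem_erase_iff.mpr ⟨hb.1, hk⟩)
      · rintro ⟨v, hv, hle⟩
        rw [hrp.mem_iff] at hv
        obtain ⟨k, hk, rfl⟩ := List.mem_map.mp hv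
        obtain ⟨hkne, hkmem⟩ := hnd.mem_erase_iff.mp hk
        refine ⟨k, hkmem, ?_⟩
        simp only [Bool.and_eq_true, bne_iff_ne, decide_eq_true_eq]
        exact ⟨hkne, hle⟩
    -- in the non-Neutral branch, st.2 is the unique maximiser, hence what max picks
    have hfinal : ¬ (∃ v ∈ rest, st.1 - 5 ≤ v) → st.2 = (PySem.List.max? ks f).getD "" := by
      intro hno
      rcases hmx : PySem.List.max? ks f with _ | w
      · exact absurd ((PySem.List.max?_eq_none_iff _ _).mp hmx) hksne
      have hwmem : w ∈ ks := PySem.List.max?_mem hmx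
      have hwmax : ∀ y ∈ ks, f y ≤ f w := PySem.List.max?_isMax hmx
      by_cases hwe : w = st.2
      · rw [hwe]; rfl
      · exfalso
        apply hno
        refine ⟨f w, ?_, ?_⟩
        · rw [hrp.mem_iff]
          exact List.mem_map_of_mem (hnd.mem_erase_iff.mpr ⟨hwe, hwmem⟩)
        · have := hwmax st.2 hw
          omega
    rcases hr : rest with _ | ⟨r0, rs⟩
    · -- single key: both second guards are false, both return the max key
      have hAn : ¬ ((ks.any (fun key => key != st.2 && decide (st.1 - 5 ≤ f key))) = true) := by
        rw [hany, hr]; simp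
      have hBn : ¬ (1 < counts.length ∧
          PySem.List.pyGetD counts 0 0 - 5 ≤ PySem.List.pyGetD counts 1 0) := by
        rw [hc, hr]; simp
      rw [if_neg hAn, if_neg hBn]
      exact hfinal (by rw [hr]; simp)
    · have hget1 : PySem.List.pyGetD counts 1 0 = r0 := by rw [hc, hr]; simp [pysem]
      have hlen : 1 < counts.length := by rw [hc, hr]; simp
      have htail : (∃ v ∈ rest, st.1 - 5 ≤ v) ↔ st.1 - 5 ≤ r0 := by
        rw [hr]
        exact pv_desc_exists r0 rs _ (hr ▸ (List.pairwise_cons.mp hpw).2)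
      by_cases hcond : st.1 - 5 ≤ r0
      · have hAy : (ks.any (fun key => key != st.2 && decide (st.1 - 5 ≤ f key))) = true :=
          hany.mpr (htail.mpr hcond)
        have hBy : 1 < counts.length ∧
            PySem.List.pyGetD counts 0 0 - 5 ≤ PySem.List.pyGetD counts 1 0 :=
          ⟨hlen, by rw [hget0, hget1, hc0]; exact hcond⟩
        rw [if_pos hAy, if_pos hBy]
      · have hAn : ¬ ((ks.any (fun key => key != st.2 && decide (st.1 - 5 ≤ f key))) = true) := by
          rw [hany, htail]; exact hcond
        have hBn : ¬ (1 < counts.length ∧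
            PySem.List.pyGetD counts 0 0 - 5 ≤ PySem.List.pyGetD counts 1 0) := by
          rw [hget0, hget1, hc0]
          rintro ⟨-, h⟩
          exact hcond h
        rw [if_neg hAn, if_neg hBn]
        exact hfinal (fun h => hcond (htail.mp h))

theorem getDominantKeywordSet_spec : Claim_equal_getDominantKeywordSet := by
  intro kc _
  unfold Spec_getDominantKeywordSet getDominantKeywordSet getDominantKeywordSet_alt
  have hnd := PySem.Dict.nodup_keys_ofList kc
  simp only []
  rw [PySem.Dict.values_eq_map_keys _ hnd 0]
  exact pv_main _ (fun k => (PySem.Dict.ofList kc).getD k 0) hnd
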